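-- pv_equiv track=rewrite | github.com/YesselmanLab/rna_secstruct_design | rna_secstruct_design/util.py | max_repeating_nucleotides
-- ===== SOURCE A (Python) =====
-- def max_repeating_nucleotides(sequence: str) -> dict:
--     """
--     Return max number of repeating nucleotides in a row for each.
--
--     Given a RNA sequence, returns a dictionary where the keys are the nucleotides
--     (A, C, G, U) and the values are the maximum number of repeating nucleotides in a row
--     for each nucleotide.
--
--     :param sequence: A RNA sequence as a string.
--     :return: A dictionary where the keys are the nucleotides (A, C, G, U) and the values
--      are the max number of repeating nucleotides in a row for each nucleotide.
--     """
--     result = {nucleotide: 0 for nucleotide in "ACGU"}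
--     for nucleotide in "ACGU":
--         count = 0
--         max_count = 0
--         for char in sequence:
--             if char == nucleotide:
--                 count += 1
--             else:
--                 max_count = max(max_count, count)
--                 count = 0
--         result[nucleotide] = max(max_count, count)
--     return result
-- ===== SOURCE B (Python) =====
-- def max_repeating_nucleotides(sequence: str) -> dict:
--     """Single pass: track the current run of the last character and update the
--     per-nucleotide maximum as the run grows, instead of one scan per nucleotide."""
--     best = {"A": 0, "C": 0, "G": 0, "U": 0}
--     prev = None
--     run = 0
--     for ch in sequence:
--         run = run + 1 if ch == prev else 1
--         prev = ch
--         if ch in best and run > best[ch]: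
--             best[ch] = run
--     return best
-- ===== Notes on version B (the rewrite author's own statement) =====
-- stated objective: faster
-- what changed: One single pass over the sequence tracking the current run length and updating each nucleotide's running maximum, instead of four separate full scans (one per nucleotide).
import Mathlib
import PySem

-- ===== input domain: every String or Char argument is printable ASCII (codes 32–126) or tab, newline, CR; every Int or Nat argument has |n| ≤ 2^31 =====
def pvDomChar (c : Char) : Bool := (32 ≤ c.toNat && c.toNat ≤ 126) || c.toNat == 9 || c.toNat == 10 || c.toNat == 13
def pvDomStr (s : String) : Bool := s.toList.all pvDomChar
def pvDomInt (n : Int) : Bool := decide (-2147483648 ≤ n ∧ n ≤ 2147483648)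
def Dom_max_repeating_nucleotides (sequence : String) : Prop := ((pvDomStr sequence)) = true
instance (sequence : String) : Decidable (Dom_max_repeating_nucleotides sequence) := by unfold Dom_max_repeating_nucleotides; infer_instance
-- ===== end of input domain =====

-- B replaces A's four per-nucleotide scans by one single pass that tracks the
-- current run length and updates each nucleotide's running maximum (objective: faster).

-- ===== PORT A =====
-- inner loop body of A: state (count, max_count)
def pvAStep (nucleotide : Char) (s : Int × Int) (ch : Char) : Int × Int :=
  if ch = nucleotide then (s.1 + 1, s.2) else (0, max s.2 s.1)

def max_repeating_nucleotides (sequence : String) : List (String × Int) :=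
  let result : PySem.Dict String Int :=
    "ACGU".toList.foldl (fun d n => d.insert n.toString 0) PySem.Dict.empty
  let result :=
    "ACGU".toList.foldl (fun d n =>
      let s := sequence.toList.foldl (pvAStep n) (0, 0)
      d.insert n.toString (max s.2 s.1)) result
  result.items

-- ===== PORT B =====
-- loop body of B: state (prev, run, best)
def pvBStep (st : Option Char × Int × PySem.Dict String Int) (ch : Char) :
    Option Char × Int × PySem.Dict String Int :=
  let run : Int := if some ch = st.1 then st.2.1 + 1 else 1
  match (st.2.2).get? ch.toString with
  | some v => if run > v then (some ch, run, (st.2.2).insert ch.toString run)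
              else (some ch, run, st.2.2)
  | none => (some ch, run, st.2.2)

def max_repeating_nucleotides_alt (sequence : String) : List (String × Int) :=
  let best : PySem.Dict String Int := PySem.Dict.ofList [("A", 0), ("C", 0), ("G", 0), ("U", 0)]
  (sequence.toList.foldl pvBStep (none, 0, best)).2.2.items

-- ===== PRECONDITION & SPEC =====
def Spec_max_repeating_nucleotides (sequence : String) (out : List (String × Int)) : Prop := out = max_repeating_nucleotides_alt sequence
instance (sequence : String) (out : List (String × Int)) : Decidable (Spec_max_repeating_nucleotides sequence out) := by unfold Spec_max_repeating_nucleotides; infer_instance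

-- ===== CLAIM (what is proved, stated in full; the proofs are below) =====
def Claim_equal_max_repeating_nucleotides : Prop := ∀ (sequence : String), Dom_max_repeating_nucleotides sequence → Spec_max_repeating_nucleotides sequence (max_repeating_nucleotides sequence)

-- ===== LEMMAS AND PROOFS =====

-- A's answer for one nucleotide, from an arbitrary inner-loop state
def pvAns (n : Char) (l : List Char) (cnt mx : Int) : Int :=
  let s := l.foldl (pvAStep n) (cnt, mx)
  max s.2 s.1

lemma pvToString_ne {a b : Char} (h : a ≠ b) : a.toString ≠ b.toString := by
  intro he
  exact h (by have := congrArg String.toList he; simpa using this)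

lemma pvBeqKey {ch k : Char} (h : ch ≠ k) : (k.toString == ch.toString) = false := by
  simp only [beq_eq_false_iff_ne]
  exact fun he => pvToString_ne h he.symm

lemma pvMaxIf (m c : Int) : (if c + 1 > max m c then c + 1 else max m c) = max m (c + 1) := by
  simp only [max_def]; split_ifs <;> omega

lemma pvMaxZero {m : Int} (c : Int) (h : 0 ≤ m) : max m c = max (max m c) 0 :=
  (max_eq_left (h.trans (le_max_left m c))).symm

-- Main invariant: running B's single pass from a state consistent with the four
-- per-nucleotide states of A yields the dict of A's four answers.
lemma pvKey : ∀ (l : List Char) (prev : Option Char) (run : Int)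
    (cA mA cC mC cG mG cU mU : Int),
    0 ≤ cA → 0 ≤ mA → 0 ≤ cC → 0 ≤ mC → 0 ≤ cG → 0 ≤ mG → 0 ≤ cU → 0 ≤ mU →
    cA = (if prev = some 'A' then run else 0) →
    cC = (if prev = some 'C' then run else 0) →
    cG = (if prev = some 'G' then run else 0) →
    cU = (if prev = some 'U' then run else 0) →
    (l.foldl pvBStep (prev, run, PySem.Dict.mk
        [("A", max mA cA), ("C", max mC cC), ("G", max mG cG), ("U", max mU cU)])).2.2
      = PySem.Dict.mk [("A", pvAns 'A' l cA mA), ("C", pvAns 'C' l cC mC),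
                       ("G", pvAns 'G' l cG mG), ("U", pvAns 'U' l cU mU)] := by
  intro l
  induction l with
  | nil => intro prev run cA mA cC mC cG mG cU mU _ _ _ _ _ _ _ _ _ _ _ _; rfl
  | cons ch t ih =>
    intro prev run cA mA cC mC cG mG cU mU hA0 hA1 hC0 hC1 hG0 hG1 hU0 hU1 hA hC hG hU
    simp only [List.foldl_cons]
    by_cases eA : ch = 'A'
    · subst eA
      have hrun : (if some 'A' = prev then run + 1 else (1:Int)) = cA + 1 := by
        by_cases hp : prev = some 'A'
        · simp [hp] at hA ⊢; omega
        · rw [if_neg (fun h => hp h.symm)]; rw [if_neg hp] at hA; omega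
      have hstep : pvBStep (prev, run, PySem.Dict.mk
            [("A", max mA cA), ("C", max mC cC), ("G", max mG cG), ("U", max mU cU)]) 'A'
          = (some 'A', cA + 1, PySem.Dict.mk [("A", max mA (cA+1)), ("C", max mC cC), ("G", max mG cG), ("U", max mU cU)]) := by
        have hts : ('A').toString = "A" := rfl
        simp only [pvBStep, hts, hrun]
        simp [PySem.Dict.get?, PySem.Dict.insert, PySem.Dict.contains]
        rw [← pvMaxIf mA cA]
        split_ifs <;> simp <;> (simp only [max_def]; split_ifs <;> omega)
      rw [hstep, pvMaxZero cC hC1, pvMaxZero cG hG1, pvMaxZero cU hU1]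
      rw [ih (some 'A') (cA+1) (cA+1) mA 0 (max mC cC) 0 (max mG cG) 0 (max mU cU) (by omega) hA1 le_rfl (hC1.trans (le_max_left _ _)) le_rfl (hG1.trans (le_max_left _ _)) le_rfl (hU1.trans (le_max_left _ _)) (by simp) (by simp) (by simp) (by simp)]
      simp [pvAns, pvAStep]
    by_cases eC : ch = 'C'
    · subst eC
      have hrun : (if some 'C' = prev then run + 1 else (1:Int)) = cC + 1 := by
        by_cases hp : prev = some 'C'
        · simp [hp] at hC ⊢; omega
        · rw [if_neg (fun h => hp h.symm)]; rw [if_neg hp] at hC; omega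
      have hstep : pvBStep (prev, run, PySem.Dict.mk
            [("A", max mA cA), ("C", max mC cC), ("G", max mG cG), ("U", max mU cU)]) 'C'
          = (some 'C', cC + 1, PySem.Dict.mk [("A", max mA cA), ("C", max mC (cC+1)), ("G", max mG cG), ("U", max mU cU)]) := by
        have hts : ('C').toString = "C" := rfl
        simp only [pvBStep, hts, hrun]
        simp [PySem.Dict.get?, PySem.Dict.insert, PySem.Dict.contains]
        rw [← pvMaxIf mC cC]
        split_ifs <;> simp <;> (simp only [max_def]; split_ifs <;> omega)
      rw [hstep, pvMaxZero cA hA1, pvMaxZero cG hG1, pvMaxZero cU hU1]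
      rw [ih (some 'C') (cC+1) 0 (max mA cA) (cC+1) mC 0 (max mG cG) 0 (max mU cU) le_rfl (hA1.trans (le_max_left _ _)) (by omega) hC1 le_rfl (hG1.trans (le_max_left _ _)) le_rfl (hU1.trans (le_max_left _ _)) (by simp) (by simp) (by simp) (by simp)]
      simp [pvAns, pvAStep]
    by_cases eG : ch = 'G'
    · subst eG
      have hrun : (if some 'G' = prev then run + 1 else (1:Int)) = cG + 1 := by
        by_cases hp : prev = some 'G'
        · simp [hp] at hG ⊢; omega
        · rw [if_neg (fun h => hp h.symm)]; rw [if_neg hp] at hG; omega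
      have hstep : pvBStep (prev, run, PySem.Dict.mk
            [("A", max mA cA), ("C", max mC cC), ("G", max mG cG), ("U", max mU cU)]) 'G'
          = (some 'G', cG + 1, PySem.Dict.mk [("A", max mA cA), ("C", max mC cC), ("G", max mG (cG+1)), ("U", max mU cU)]) := by
        have hts : ('G').toString = "G" := rfl
        simp only [pvBStep, hts, hrun]
        simp [PySem.Dict.get?, PySem.Dict.insert, PySem.Dict.contains]
        rw [← pvMaxIf mG cG]
        split_ifs <;> simp <;> (simp only [max_def]; split_ifs <;> omega)
      rw [hstep, pvMaxZero cA hA1, pvMaxZero cC hC1, pvMaxZero cU hU1]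
      rw [ih (some 'G') (cG+1) 0 (max mA cA) 0 (max mC cC) (cG+1) mG 0 (max mU cU) le_rfl (hA1.trans (le_max_left _ _)) le_rfl (hC1.trans (le_max_left _ _)) (by omega) hG1 le_rfl (hU1.trans (le_max_left _ _)) (by simp) (by simp) (by simp) (by simp)]
      simp [pvAns, pvAStep]
    by_cases eU : ch = 'U'
    · subst eU
      have hrun : (if some 'U' = prev then run + 1 else (1:Int)) = cU + 1 := by
        by_cases hp : prev = some 'U'
        · simp [hp] at hU ⊢; omega
        · rw [if_neg (fun h => hp h.symm)]; rw [if_neg hp] at hU; omega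
      have hstep : pvBStep (prev, run, PySem.Dict.mk
            [("A", max mA cA), ("C", max mC cC), ("G", max mG cG), ("U", max mU cU)]) 'U'
          = (some 'U', cU + 1, PySem.Dict.mk [("A", max mA cA), ("C", max mC cC), ("G", max mG cG), ("U", max mU (cU+1))]) := by
        have hts : ('U').toString = "U" := rfl
        simp only [pvBStep, hts, hrun]
        simp [PySem.Dict.get?, PySem.Dict.insert, PySem.Dict.contains]
        rw [← pvMaxIf mU cU]
        split_ifs <;> simp <;> (simp only [max_def]; split_ifs <;> omega)
      rw [hstep, pvMaxZero cA hA1, pvMaxZero cC hC1, pvMaxZero cG hG1]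
      rw [ih (some 'U') (cU+1) 0 (max mA cA) 0 (max mC cC) 0 (max mG cG) (cU+1) mU le_rfl (hA1.trans (le_max_left _ _)) le_rfl (hC1.trans (le_max_left _ _)) le_rfl (hG1.trans (le_max_left _ _)) (by omega) hU1 (by simp) (by simp) (by simp) (by simp)]
      simp [pvAns, pvAStep]
    have hstep : pvBStep (prev, run, PySem.Dict.mk
          [("A", max mA cA), ("C", max mC cC), ("G", max mG cG), ("U", max mU cU)]) ch
        = (some ch, (if some ch = prev then run + 1 else 1), PySem.Dict.mk
          [("A", max mA cA), ("C", max mC cC), ("G", max mG cG), ("U", max mU cU)]) := by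
      have bA : (("A":String) == String.singleton ch) = false := pvBeqKey eA
      have bC : (("C":String) == String.singleton ch) = false := pvBeqKey eC
      have bG : (("G":String) == String.singleton ch) = false := pvBeqKey eG
      have bU : (("U":String) == String.singleton ch) = false := pvBeqKey eU
      simp only [pvBStep]
      simp [PySem.Dict.get?, List.find?, bA, bC, bG, bU]
    rw [hstep, pvMaxZero cA hA1, pvMaxZero cC hC1, pvMaxZero cG hG1, pvMaxZero cU hU1]
    rw [ih (some ch) (if some ch = prev then run + 1 else 1) 0 (max mA cA) 0 (max mC cC) 0 (max mG cG) 0 (max mU cU) le_rfl (hA1.trans (le_max_left _ _)) le_rfl (hC1.trans (le_max_left _ _)) le_rfl (hG1.trans (le_max_left _ _)) le_rfl (hU1.trans (le_max_left _ _)) (by simp [Option.some.injEq, eA]) (by simp [Option.some.injEq, eC]) (by simp [Option.some.injEq, eG]) (by simp [Option.some.injEq, eU])]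
    simp [pvAns, pvAStep, eA, eC, eG, eU]

-- ===== VERDICT (by name: the statement is the Claim_ definition above) =====
theorem max_repeating_nucleotides_spec : Claim_equal_max_repeating_nucleotides := by
  intro seq _
  unfold Spec_max_repeating_nucleotides max_repeating_nucleotides max_repeating_nucleotides_alt
  have h := pvKey seq.toList none 0 0 0 0 0 0 0 0 0 le_rfl le_rfl le_rfl le_rfl le_rfl le_rfl
    le_rfl le_rfl (by simp) (by simp) (by simp) (by simp)
  norm_num at h
  have hof : PySem.Dict.ofList [("A", (0:Int)), ("C", 0), ("G", 0), ("U", 0)]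
      = PySem.Dict.mk [("A", 0), ("C", 0), ("G", 0), ("U", 0)] := by decide
  have hacgu : "ACGU".toList = ['A', 'C', 'G', 'U'] := rfl
  have h0 : ("ACGU".toList.foldl (fun (d : PySem.Dict String Int) n => d.insert n.toString 0)
      PySem.Dict.empty) = PySem.Dict.mk [("A", 0), ("C", 0), ("G", 0), ("U", 0)] := by decide
  have sA : String.singleton 'A' = "A" := rfl
  have sC : String.singleton 'C' = "C" := rfl
  have sG : String.singleton 'G' = "G" := rfl
  have sU : String.singleton 'U' = "U" := rfl
  simp only [hof, h0]
  rw [hacgu]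
  simp only [List.foldl_cons, List.foldl_nil]
  rw [h]
  simp [PySem.Dict.insert, PySem.Dict.contains, List.any, List.map,
    sA, sC, sG, sU, pvAns]
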